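-- pv_equiv track=rewrite | github.com/abeeto/PyTorchCodeCloneAnalysis | GHData/lacozhang_torchcode/utils.py | _eval_help
-- ===== SOURCE A (Python) =====
-- def _eval_help(tag, lt, lp, major=1):
--     lt = list(map(lambda x: ["Neg", tag][x == tag], lt))
--     lp = list(map(lambda x: ["Neg", tag][x == tag], lp))
--     cache = [(p == tag) for i, p in enumerate([lt, lp][major])]
--     pre, loc = cache[0], []
--     for i, flag in enumerate(cache):
--         if i == 0:
--             l = i
--         elif pre != flag:
--             r = i
--             loc += (l, r),
--             l = i
--         pre = flag
--     loc += (l, len(cache)),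
--     lt_res, lp_res = [], []
--     for i, t in enumerate(loc):
--         lt_res += tuple(lt[t[0]:t[1]]),
--         lp_res += tuple(lp[t[0]:t[1]]),
--     return lt_res, lp_res
-- ===== SOURCE B (Python) =====
-- def _eval_help(tag, lt, lp, major=1):
--     lt = ["Neg" if e != tag else e for e in lt]
--     lp = ["Neg" if e != tag else e for e in lp]
--     chosen = [lt, lp][major]
--     lt_res, lp_res = [], []
--     prev = None
--     for i, e in enumerate(chosen):
--         f = e == tag
--         if i == 0 or f != prev:
--             lt_res.append([])
--             lp_res.append([])
--         if i < len(lt):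
--             lt_res[-1].append(lt[i])
--         if i < len(lp):
--             lp_res[-1].append(lp[i])
--         prev = f
--     return [tuple(r) for r in lt_res], [tuple(r) for r in lp_res]
-- ===== Notes on version B (the rewrite author's own statement) =====
-- stated objective: alternative
-- what changed: B drops A's run-boundary machinery entirely: instead of recording (l, r) change-point pairs and then slicing both lists by them, B makes one element-wise pass that opens a new run on a flag change and appends lt[i] / lp[i] directly into the current run (guarded by i < len), so no boundary list and no slicing exist.
import Mathlib
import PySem

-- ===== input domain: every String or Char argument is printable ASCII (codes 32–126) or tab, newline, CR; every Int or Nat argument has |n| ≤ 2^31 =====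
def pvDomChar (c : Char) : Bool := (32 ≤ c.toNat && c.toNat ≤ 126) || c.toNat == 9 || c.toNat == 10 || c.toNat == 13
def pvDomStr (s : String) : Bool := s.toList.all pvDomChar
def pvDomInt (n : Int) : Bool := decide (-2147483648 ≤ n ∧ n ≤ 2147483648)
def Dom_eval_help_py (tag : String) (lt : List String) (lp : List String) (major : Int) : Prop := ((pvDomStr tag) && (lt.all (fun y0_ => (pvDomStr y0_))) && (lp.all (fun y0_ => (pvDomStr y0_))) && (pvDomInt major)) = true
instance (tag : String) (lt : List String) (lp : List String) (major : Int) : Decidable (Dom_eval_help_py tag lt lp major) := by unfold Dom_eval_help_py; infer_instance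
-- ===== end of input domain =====

-- B replaces A's "record (l,r) run boundaries, then re-slice both lists" with a single
-- element-wise pass that opens a new run on each flag change and appends lt[i]/lp[i] into
-- the current run directly (objective: alternative; same O(n) cost).

-- ===== PORT A =====
-- the body of A's index loop over `enumerate(cache)`; state = (pre, l, loc)
def stepA_eval (s : Bool × Nat × List (Nat × Nat)) (fi : Bool × Nat) : Bool × Nat × List (Nat × Nat) :=
  if fi.2 == 0 then (fi.1, fi.2, s.2.2)
  else if s.1 != fi.1 then (fi.1, fi.2, s.2.2 ++ [(s.2.1, fi.2)])
  else (fi.1, s.2.1, s.2.2)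

def eval_help_py (tag : String) (lt : List String) (lp : List String) (major : Int) : List (List String) × List (List String) :=
  let lt' := lt.map (fun x => if x == tag then tag else "Neg")
  let lp' := lp.map (fun x => if x == tag then tag else "Neg")
  match PySem.List.pyGet? [lt', lp'] major with
  | none => ([], [])      -- Python: IndexError on [lt, lp][major]; excluded by Pre_
  | some sel =>
    let cache := sel.map (fun p => p == tag)
    -- pre = cache[0] raises IndexError on empty cache (excluded by Pre_); headD stands for that read
    let st := cache.zipIdx.foldl stepA_eval (cache.headD false, 0, [])
    let loc := st.2.2 ++ [(st.2.1, cache.length)]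
    (loc.foldl (fun acc t => acc ++ [PySem.List.slice lt' (some (t.1 : Int)) (some (t.2 : Int))]) [],
     loc.foldl (fun acc t => acc ++ [PySem.List.slice lp' (some (t.1 : Int)) (some (t.2 : Int))]) [])

-- ===== PORT B =====
-- `res[-1].append(v)`: append v to the last run (Source B only calls it with res nonempty)
def pushLast_eval (res : List (List String)) (v : Option String) : List (List String) :=
  res.dropLast ++ [res.getLastD [] ++ v.toList]

-- body of Source B's single loop; state = (lt_res, lp_res, prev); fi = (f, i);
-- `if i < len(lt): lt_res[-1].append(lt[i])` is the Option returned by pyGet? (none = skip)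
def stepB_eval (lt lp : List String) (s : List (List String) × List (List String) × Bool)
    (fi : Bool × Nat) : List (List String) × List (List String) × Bool :=
  let s1 := if fi.2 == 0 || (fi.1 != s.2.2) then (s.1 ++ [[]], s.2.1 ++ [[]]) else (s.1, s.2.1)
  (pushLast_eval s1.1 (PySem.List.pyGet? lt (fi.2 : Int)),
   pushLast_eval s1.2 (PySem.List.pyGet? lp (fi.2 : Int)), fi.1)

def eval_help_py_alt (tag : String) (lt : List String) (lp : List String) (major : Int) : List (List String) × List (List String) :=
  let lt' := lt.map (fun e => if e != tag then "Neg" else e)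
  let lp' := lp.map (fun e => if e != tag then "Neg" else e)
  match PySem.List.pyGet? [lt', lp'] major with
  | none => ([], [])      -- Python: IndexError on [lt, lp][major]; excluded by Pre_
  | some chosen =>
    let st := (chosen.map (fun e => e == tag)).zipIdx.foldl (stepB_eval lt' lp') ([], [], false)
    (st.1, st.2.1)

-- ===== PRECONDITION & SPEC =====
-- Pre_ excludes exactly the inputs where Python A raises IndexError: an out-of-range major
-- (valid Python indices for [lt, lp] are -2..1) or an empty selected list (cache[0]).
def Pre_eval_help_py (tag : String) (lt : List String) (lp : List String) (major : Int) : Prop :=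
  ((major = 0 ∨ major = -2) ∧ lt ≠ []) ∨ ((major = 1 ∨ major = -1) ∧ lp ≠ [])
instance (tag : String) (lt : List String) (lp : List String) (major : Int) : Decidable (Pre_eval_help_py tag lt lp major) := by unfold Pre_eval_help_py; infer_instance

def pvWitness_eval_help_py : String × List String × List String × Int := ("B", ["B", "x"], ["B"], 1)

def Spec_eval_help_py (tag : String) (lt : List String) (lp : List String) (major : Int) (out : List (List String) × List (List String)) : Prop := out = eval_help_py_alt tag lt lp major
instance (tag : String) (lt : List String) (lp : List String) (major : Int) (out : List (List String) × List (List String)) : Decidable (Spec_eval_help_py tag lt lp major out) := by unfold Spec_eval_help_py; infer_instance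

-- ===== CLAIM (what is proved, stated in full; the proofs are below) =====
def Claim_equal_eval_help_py : Prop := ∀ (tag : String) (lt : List String) (lp : List String) (major : Int), Dom_eval_help_py tag lt lp major → Pre_eval_help_py tag lt lp major → Spec_eval_help_py tag lt lp major (eval_help_py tag lt lp major)

-- ===== LEMMAS AND PROOFS =====

-- the slice of xs an A-boundary pair (l, r) produces
def sliceP_eval (xs : List String) (t : Nat × Nat) : List String :=
  PySem.List.slice xs (some (t.1 : Int)) (some (t.2 : Int))

theorem slice_snoc (xs : List String) (l i : Nat) (h : l ≤ i) :
    sliceP_eval xs (l, i + 1) = sliceP_eval xs (l, i) ++ (PySem.List.pyGet? xs (i : Int)).toList := by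
  simp only [sliceP_eval, PySem.List.slice_natCast, PySem.List.pyGet?_natCast]
  rw [show i + 1 - l = (i - l) + 1 by omega, List.take_add_one, List.getElem?_drop,
    show l + (i - l) = i by omega]

theorem pushLast_map_snoc (f : Nat × Nat → List String) (loc : List (Nat × Nat)) (t : Nat × Nat)
    (v : Option String) :
    pushLast_eval ((loc.map f) ++ [f t]) v = loc.map f ++ [f t ++ v.toList] := by
  simp [pushLast_eval]

-- core invariant: B's element-wise fold tracks A's boundary fold, run by run
theorem inv_eval (lt lp : List String) (todo : List Bool) :
    ∀ (i : Nat) (pre : Bool) (l : Nat) (loc : List (Nat × Nat)), 1 ≤ i → l ≤ i →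
    (todo.zipIdx i).foldl (stepB_eval lt lp)
      ((loc ++ [(l, i)]).map (sliceP_eval lt), (loc ++ [(l, i)]).map (sliceP_eval lp), pre)
    = ((((todo.zipIdx i).foldl stepA_eval (pre, l, loc)).2.2
          ++ [(((todo.zipIdx i).foldl stepA_eval (pre, l, loc)).2.1, i + todo.length)]).map (sliceP_eval lt),
       (((todo.zipIdx i).foldl stepA_eval (pre, l, loc)).2.2
          ++ [(((todo.zipIdx i).foldl stepA_eval (pre, l, loc)).2.1, i + todo.length)]).map (sliceP_eval lp),
       todo.getLastD pre) := by
  induction todo with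
  | nil => intro i pre l loc _ _; simp
  | cons x rest ih =>
    intro i pre l loc hi hl
    have hi0 : (i == 0) = false := by simp; omega
    by_cases hpx : pre = x
    · have hne : (x != pre) = false := by simp [hpx]
      have hne' : (pre != x) = false := by simp [hpx]
      simp only [List.zipIdx_cons, List.foldl_cons, stepA_eval, stepB_eval, hi0, hne, hne',
        Bool.or_self, if_false, Bool.false_eq_true]
      rw [List.map_append, List.map_append, List.map_singleton, List.map_singleton,
        pushLast_map_snoc, pushLast_map_snoc,
        ← slice_snoc lt l i hl, ← slice_snoc lp l i hl,
        show List.map (sliceP_eval lt) loc ++ [sliceP_eval lt (l, i + 1)]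
            = List.map (sliceP_eval lt) (loc ++ [(l, i + 1)]) by simp,
        show List.map (sliceP_eval lp) loc ++ [sliceP_eval lp (l, i + 1)]
            = List.map (sliceP_eval lp) (loc ++ [(l, i + 1)]) by simp]
      have h2 := ih (i + 1) x l loc (by omega) (by omega)
      rw [show i + (x :: rest).length = i + 1 + rest.length by simp; omega]
      have hg : (x :: rest).getLastD pre = rest.getLastD x := by simp [List.getLastD_eq_getLast?, List.getLast?_cons]
      rw [hg]
      exact h2
    · have hne : (x != pre) = true := by simp; exact fun h => hpx h.symm
      have hne' : (pre != x) = true := by simp [hpx]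
      simp only [List.zipIdx_cons, List.foldl_cons, stepA_eval, stepB_eval, hi0, hne, hne',
        Bool.or_true, if_true, if_false, Bool.false_eq_true]
      rw [List.map_append, List.map_append, List.map_singleton, List.map_singleton]
      rw [show (loc.map (sliceP_eval lt) ++ [sliceP_eval lt (l, i)]) ++ [[]]
            = ((loc ++ [(l, i)]).map (sliceP_eval lt)) ++ [sliceP_eval lt (i, i)] by
          simp [sliceP_eval, PySem.List.slice_natCast]]
      rw [show (loc.map (sliceP_eval lp) ++ [sliceP_eval lp (l, i)]) ++ [[]]
            = ((loc ++ [(l, i)]).map (sliceP_eval lp)) ++ [sliceP_eval lp (i, i)] by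
          simp [sliceP_eval, PySem.List.slice_natCast]]
      rw [pushLast_map_snoc, pushLast_map_snoc, ← slice_snoc lt i i (le_refl i),
        ← slice_snoc lp i i (le_refl i)]
      rw [show List.map (sliceP_eval lt) (loc ++ [(l, i)]) ++ [sliceP_eval lt (i, i + 1)]
            = ((loc ++ [(l, i)]) ++ [(i, i + 1)]).map (sliceP_eval lt) by simp]
      rw [show List.map (sliceP_eval lp) (loc ++ [(l, i)]) ++ [sliceP_eval lp (i, i + 1)]
            = ((loc ++ [(l, i)]) ++ [(i, i + 1)]).map (sliceP_eval lp) by simp]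
      have h2 := ih (i + 1) x i (loc ++ [(l, i)]) (by omega) (by omega)
      rw [show i + (x :: rest).length = i + 1 + rest.length by simp; omega]
      have hg : (x :: rest).getLastD pre = rest.getLastD x := by simp [List.getLastD_eq_getLast?, List.getLast?_cons]
      rw [hg]
      exact h2

-- A's slice-of-loc computation equals B's element-wise loop, for nonempty flags
theorem core_eval (lt' lp' : List String) (flags : List Bool) (h : flags ≠ []) :
    (((flags.zipIdx.foldl stepA_eval (flags.headD false, 0, [])).2.2
        ++ [((flags.zipIdx.foldl stepA_eval (flags.headD false, 0, [])).2.1, flags.length)]).foldl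
        (fun acc t => acc ++ [PySem.List.slice lt' (some (t.1 : Int)) (some (t.2 : Int))]) [],
     ((flags.zipIdx.foldl stepA_eval (flags.headD false, 0, [])).2.2
        ++ [((flags.zipIdx.foldl stepA_eval (flags.headD false, 0, [])).2.1, flags.length)]).foldl
        (fun acc t => acc ++ [PySem.List.slice lp' (some (t.1 : Int)) (some (t.2 : Int))]) [])
    = ((flags.zipIdx.foldl (stepB_eval lt' lp') ([], [], false)).1,
       (flags.zipIdx.foldl (stepB_eval lt' lp') ([], [], false)).2.1) := by
  match flags, h with
  | c :: rest, _ =>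
    have hA : (c :: rest).zipIdx.foldl stepA_eval ((c :: rest).headD false, 0, [])
        = (rest.zipIdx 1).foldl stepA_eval (c, 0, []) := by
      simp [List.zipIdx_cons, stepA_eval]
    have hB : (c :: rest).zipIdx.foldl (stepB_eval lt' lp') ([], [], false)
        = (rest.zipIdx 1).foldl (stepB_eval lt' lp')
            (([] ++ [(0, 1)]).map (sliceP_eval lt'), ([] ++ [(0, 1)]).map (sliceP_eval lp'), c) := by
      have g0 : ∀ (xs : List String), PySem.List.pyGet? xs (0 : Int) = xs[0]? := by
        intro xs
        simpa using PySem.List.pyGet?_natCast xs 0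
      simp [List.zipIdx_cons, stepB_eval, pushLast_eval, sliceP_eval, PySem.List.slice_to, g0,
        List.take_one, List.head?_eq_getElem?]
    rw [hA, hB, inv_eval lt' lp' rest 1 c 0 [] (by omega) (by omega)]
    rw [PySem.List.foldl_append_singleton_eq_map, PySem.List.foldl_append_singleton_eq_map]
    have e : 1 + rest.length = (c :: rest).length := by simp; omega
    simp only [e, List.nil_append]
    rfl

theorem mapNeg_eq (tag : String) (l : List String) :
    l.map (fun x => if x == tag then tag else "Neg") = l.map (fun e => if e != tag then "Neg" else e) := by
  apply List.map_congr_left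
  intro e _
  by_cases he : e = tag
  · simp [he]
  · simp [he]

theorem eval_help_py_spec : Claim_equal_eval_help_py := by
  intro tag lt lp major _ hPre
  unfold Spec_eval_help_py eval_help_py eval_help_py_alt
  rw [← mapNeg_eq tag lt, ← mapNeg_eq tag lp]
  set lt' := lt.map (fun x => if x == tag then tag else "Neg") with hlt'
  set lp' := lp.map (fun x => if x == tag then tag else "Neg") with hlp'
  have hnlt : lt ≠ [] → lt'.map (fun p => p == tag) ≠ [] := by
    intro h; simp [hlt']; exact h
  have hnlp : lp ≠ [] → lp'.map (fun p => p == tag) ≠ [] := by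
    intro h; simp [hlp']; exact h
  rcases hPre with ⟨hm, hne⟩ | ⟨hm, hne⟩
  · rcases hm with rfl | rfl
    · simp only [show PySem.List.pyGet? [lt', lp'] 0 = some lt' from rfl]
      exact core_eval lt' lp' (lt'.map (fun p => p == tag)) (hnlt hne)
    · simp only [show PySem.List.pyGet? [lt', lp'] (-2) = some lt' from rfl]
      exact core_eval lt' lp' (lt'.map (fun p => p == tag)) (hnlt hne)
  · rcases hm with rfl | rfl
    · simp only [show PySem.List.pyGet? [lt', lp'] 1 = some lp' from rfl]
      exact core_eval lt' lp' (lp'.map (fun p => p == tag)) (hnlp hne)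
    · simp only [show PySem.List.pyGet? [lt', lp'] (-1) = some lp' from rfl]
      exact core_eval lt' lp' (lp'.map (fun p => p == tag)) (hnlp hne)
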